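-- pv_equiv track=rewrite | github.com/georgebvro/freeCodeCamp-Daily-Coding-Challenge | 2026-03/2026-03-05/smallest_gap.py | smallest_gap
-- ===== SOURCE A (Python) =====
-- def smallest_gap(s):
--     smallest_gap_size = float('inf')
--     smallest_gap_contents = ""
--
--     for i in range(len(s) - 1):
--         for j in range(i + 1, len(s)):
--             gap_size = j - i - 1
--
--             if s[i] == s[j] and gap_size < smallest_gap_size:
--                 smallest_gap_size = gap_size
--                 smallest_gap_contents = s[i + 1:j]
--                 break
--
--     return smallest_gap_contents
-- ===== SOURCE B (Python) =====
-- def smallest_gap(s):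
--     # O(n): right-to-left pass records the next occurrence of each char; then one
--     # left-to-right strict-min scan over the (i, next[i]) gaps.
--     seen = {}
--     nxt_rev = []
--     for i in range(len(s) - 1, -1, -1):
--         nxt_rev.append(seen.get(s[i]))
--         seen[s[i]] = i
--     best = None
--     res = ""
--     for i, j in enumerate(reversed(nxt_rev)):
--         if j is not None:
--             g = j - i - 1
--             if best is None or g < best:
--                 best = g
--                 res = s[i + 1:j]
--     return res
-- ===== Notes on version B (the rewrite author's own statement) =====
-- stated objective: faster
-- what changed: Replaces A's quadratic double loop (for each i, scan forward for the next equal character) with an O(n) right-to-left pass that records, via a last-seen dictionary, the next occurrence of each character, followed by a single strict-min scan over the gaps.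
import Mathlib
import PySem

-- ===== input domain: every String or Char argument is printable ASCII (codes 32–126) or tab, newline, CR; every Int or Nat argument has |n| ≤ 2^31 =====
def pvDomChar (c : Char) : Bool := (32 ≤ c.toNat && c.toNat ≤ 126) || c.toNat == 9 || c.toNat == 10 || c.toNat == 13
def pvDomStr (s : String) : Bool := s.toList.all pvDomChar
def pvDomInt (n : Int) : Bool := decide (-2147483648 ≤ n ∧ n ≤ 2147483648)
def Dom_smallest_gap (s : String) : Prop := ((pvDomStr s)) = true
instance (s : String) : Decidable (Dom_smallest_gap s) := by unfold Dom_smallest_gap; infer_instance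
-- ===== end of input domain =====

-- B replaces A's quadratic inner scan with an O(n) right-to-left next-occurrence pass
-- followed by one strict-min scan (objective: faster).

-- ===== PORT A =====
-- inner `for j in range(i+1, len(s))` loop with its `break`, carried state (smallest_gap_size, smallest_gap_contents);
-- `float('inf')` is ported as `none`. s[i], s[j] are pyGet?; both indices come from ranges inside
-- [0, len(s)), where pyGet? is `some`, so the Option comparison equals Python's char comparison.
def sgInnerA (cs : List Char) (i : Int) (best : Option Int) (cont : String) :
    List Int → Option Int × String
  | [] => (best, cont)
  | j :: js =>
      let gap := j - i - 1
      if (PySem.List.pyGet? cs i == PySem.List.pyGet? cs j)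
          && (match best with | none => true | some b => decide (gap < b)) then
        (some gap, String.ofList (PySem.List.slice cs (some (i + 1)) (some j)))
      else
        sgInnerA cs i best cont js

def smallest_gap (s : String) : String :=
  let cs := s.toList
  ((PySem.List.pyRange 0 ((cs.length : Int) - 1)).foldl
      (fun st i => sgInnerA cs i st.1 st.2 (PySem.List.pyRange (i + 1) (cs.length : Int)))
      ((none : Option Int), "")).2

-- ===== PORT B =====
-- first loop of Source B: for i in range(len(s)-1, -1, -1): nxt_rev.append(seen.get(s[i])); seen[s[i]] = i
-- then one enumerate pass over reversed(nxt_rev) keeping the strict minimum gap.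
def smallest_gap_alt (s : String) : String :=
  let cs := s.toList
  let p1 := (PySem.List.pyRange ((cs.length : Int) - 1) (-1) (-1)).foldl
      (fun (st : PySem.Dict Char Int × List (Option Int)) i =>
        match PySem.List.pyGet? cs i with
        | some c => (st.1.insert c i, st.2 ++ [st.1.get? c])
        | none => st)   -- unreachable: every i from range(len(s)) is in bounds
      (PySem.Dict.empty, [])
  ((PySem.List.enumerate p1.2.reverse).foldl
      (fun (st : Option Int × String) p =>
        match p.2 with
        | some j =>
            let g := j - p.1 - 1
            match st.1 with
            | none => (some g, String.ofList (PySem.List.slice cs (some (p.1 + 1)) (some j)))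
            | some b =>
                if g < b then (some g, String.ofList (PySem.List.slice cs (some (p.1 + 1)) (some j)))
                else st
        | none => st)
      ((none : Option Int), "")).2

-- ===== PRECONDITION & SPEC =====
def Spec_smallest_gap (s : String) (out : String) : Prop := out = smallest_gap_alt s
instance (s : String) (out : String) : Decidable (Spec_smallest_gap s out) := by unfold Spec_smallest_gap; infer_instance

-- ===== CLAIM (what is proved, stated in full; the proofs are below) =====
def Claim_equal_smallest_gap : Prop := ∀ (s : String), Dom_smallest_gap s → Spec_smallest_gap s (smallest_gap s)

-- ===== LEMMAS AND PROOFS =====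

-- first index a' ≥ a with cs[a'] = c, as an Int (none if there is none)
def firstEqN (cs : List Char) (c : Char) (a : Nat) : Option Int :=
  if h : a < cs.length then
    (if cs[a] = c then some (a : Int) else firstEqN cs c (a + 1))
  else none
termination_by cs.length - a

-- next occurrence of cs[i] strictly after i
def nxtOf (cs : List Char) (i : Nat) : Option Int :=
  match cs[i]? with
  | some c => firstEqN cs c (i + 1)
  | none => none

-- one strict-min update on state (best gap, contents) from the pair (i, next occurrence)
def sgStep (cs : List Char) (st : Option Int × String) (i : Int) (o : Option Int) :
    Option Int × String :=
  match o with
  | some j =>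
      let g := j - i - 1
      match st.1 with
      | none => (some g, String.ofList (PySem.List.slice cs (some (i + 1)) (some j)))
      | some b =>
          if g < b then (some g, String.ofList (PySem.List.slice cs (some (i + 1)) (some j)))
          else st
  | none => st

lemma pyRange_one_nil {a b : Int} (h : b ≤ a) : PySem.List.pyRange a b = [] := by
  simp [PySem.List.pyRange]
  omega

lemma firstEqN_ge (cs : List Char) (c : Char) (a : Nat) (h : cs.length ≤ a) :
    firstEqN cs c a = none := by
  rw [firstEqN]; simp [Nat.not_lt.mpr h]

lemma sgInnerA_noupdate (cs : List Char) (i : Nat) (b : Int) (cont : String) :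
    ∀ a : Nat, b ≤ (a : Int) - (i : Int) - 1 →
      sgInnerA cs (i : Int) (some b) cont
        (PySem.List.pyRange (a : Int) (cs.length : Int)) = (some b, cont)
  | a, hb => by
    by_cases ha : a < cs.length
    · rw [PySem.List.pyRange_one_cons (by exact_mod_cast ha)]
      have hlt : ¬((a : Int) - (i : Int) - 1 < b) := by omega
      have hcast : ((a : Int) + 1) = ((a + 1 : Nat) : Int) := by push_cast; ring
      simp only [sgInnerA, decide_eq_false hlt, Bool.and_false, Bool.false_eq_true,
        not_false_eq_true, if_neg, hcast]
      exact sgInnerA_noupdate cs i b cont (a + 1) (by push_cast; omega)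
    · rw [pyRange_one_nil (by exact_mod_cast Nat.not_lt.mp ha)]
      simp [sgInnerA]
termination_by a => cs.length - a
decreasing_by omega

lemma sgInnerA_eq (cs : List Char) (i : Nat) (c : Char) (hc : cs[i]? = some c) :
    ∀ a : Nat, i < a → ∀ (best : Option Int) (cont : String),
      sgInnerA cs (i : Int) best cont
        (PySem.List.pyRange (a : Int) (cs.length : Int))
      = sgStep cs (best, cont) (i : Int) (firstEqN cs c a)
  | a, hia, best, cont => by
    have hcast : ((a : Int) + 1) = ((a + 1 : Nat) : Int) := by push_cast; ring
    by_cases ha : a < cs.length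
    · rw [PySem.List.pyRange_one_cons (by exact_mod_cast ha), firstEqN]
      have hgi : PySem.List.pyGet? cs (i : Int) = some c := by
        simp [PySem.List.pyGet?_natCast, hc]
      by_cases heq : cs[a] = c
      · have hga : PySem.List.pyGet? cs (a : Int) = some c := by
          simp [PySem.List.pyGet?_natCast, List.getElem?_eq_getElem ha, heq]
        have hbeq : (PySem.List.pyGet? cs (i : Int) == PySem.List.pyGet? cs (a : Int)) = true := by
          rw [hgi, hga]; simp
        rw [dif_pos ha, if_pos heq]
        cases best with
        | none =>
          simp only [sgInnerA, hbeq, Bool.true_and, if_pos]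
          rfl
        | some b =>
          by_cases hg : ((a : Int) - (i : Int) - 1 < b)
          · simp only [sgInnerA, hbeq, Bool.true_and, decide_eq_true hg, if_pos]
            simp [sgStep, hg]
          · simp only [sgInnerA, hbeq, Bool.true_and, decide_eq_false hg, Bool.false_eq_true,
              not_false_eq_true, if_neg, hcast]
            rw [sgInnerA_noupdate cs i b cont (a + 1) (by push_cast; omega)]
            simp [sgStep, hg]
      · have hga : PySem.List.pyGet? cs (a : Int) = some cs[a] := by
          simp [PySem.List.pyGet?_natCast, List.getElem?_eq_getElem ha]
        have hbeq : (PySem.List.pyGet? cs (i : Int) == PySem.List.pyGet? cs (a : Int)) = false := by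
          rw [hgi, hga]
          simp
          exact fun h => heq h.symm
        rw [dif_pos ha, if_neg heq]
        simp only [sgInnerA, hbeq, Bool.false_and, Bool.false_eq_true, not_false_eq_true,
          if_neg, hcast]
        exact sgInnerA_eq cs i c hc (a + 1) (by omega) best cont
    · rw [pyRange_one_nil (by exact_mod_cast Nat.not_lt.mp ha),
        firstEqN_ge cs c a (Nat.not_lt.mp ha)]
      simp [sgInnerA, sgStep]
termination_by a => cs.length - a
decreasing_by omega

-- A is the strict-min fold of (i, next occurrence of s[i]) over i = 0 .. n-2
lemma A_eq_ref (cs : List Char) :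
    ((PySem.List.pyRange 0 ((cs.length : Int) - 1)).foldl
      (fun st i => sgInnerA cs i st.1 st.2 (PySem.List.pyRange (i + 1) (cs.length : Int)))
      ((none : Option Int), ""))
    = (List.range (cs.length - 1)).foldl
        (fun st (i : Nat) => sgStep cs st (i : Int) (nxtOf cs i)) ((none : Option Int), "") := by
  rcases Nat.eq_zero_or_pos cs.length with h0 | hpos
  · rw [h0, pyRange_one_nil (by norm_num)]
    rfl
  · have hc1 : ((cs.length : Int) - 1) = ((cs.length - 1 : Nat) : Int) := by omega
    rw [hc1, PySem.List.pyRange_zero_natCast, List.foldl_map]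
    apply PySem.List.foldl_congr_mem
    intro st x hx
    have hx' : x < cs.length - 1 := List.mem_range.mp hx
    have hxl : x < cs.length := by omega
    have hcx : cs[x]? = some cs[x] := List.getElem?_eq_getElem hxl
    have hcast : ((x : Int) + 1) = ((x + 1 : Nat) : Int) := by push_cast; ring
    rw [hcast, sgInnerA_eq cs x cs[x] hcx (x + 1) (by omega) st.1 st.2]
    simp [nxtOf, hcx]

lemma pyRange_down (n : Nat) :
    PySem.List.pyRange ((n : Int) - 1) (-1) (-1)
      = (List.range n).reverse.map (fun (k : Nat) => (k : Int)) := by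
  rcases Nat.eq_zero_or_pos n with h0 | hpos
  · rw [h0]
    simp [PySem.List.pyRange]
  · unfold PySem.List.pyRange
    have h1 : ((n : Int) - 1 - -1 + - -1 - 1) / - -1 = (n : Int) := by norm_num
    have h2 : ((n : Int) - 1 - -1 + - -1 - 1) / - -1 = ((n : Int)) := h1
    simp only [if_neg (by norm_num : ¬((-1 : Int) = 0)),
      if_neg (by norm_num : ¬((0 : Int) < -1)),
      if_pos (by omega : (-1 : Int) < (n : Int) - 1), h1, Int.toNat_natCast]
    apply List.ext_getElem
    · simp
    · intro i hi1 hi2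
      have hi : i < n := by simpa using hi1
      simp only [List.getElem_map, List.getElem_reverse, List.getElem_range, List.length_range]
      push_cast [Nat.sub_sub, Nat.cast_sub (by omega : 1 + i ≤ n)]
      omega

-- B's first pass produces exactly the next-occurrence table
lemma B_build (cs : List Char) :
    ∀ (m : Nat), m ≤ cs.length → ∀ (d : PySem.Dict Char Int) (acc : List (Option Int)),
      (∀ c, d.get? c = firstEqN cs c m) →
      (((List.range m).reverse.map (fun (k : Nat) => (k : Int))).foldl
        (fun (st : PySem.Dict Char Int × List (Option Int)) i =>
          match PySem.List.pyGet? cs i with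
          | some c => (st.1.insert c i, st.2 ++ [st.1.get? c])
          | none => st) (d, acc)).2
      = acc ++ ((List.range m).map (nxtOf cs)).reverse
  | 0, hm, d, acc, hd => by simp
  | (m + 1), hm, d, acc, hd => by
    have hml : m < cs.length := hm
    have hg : PySem.List.pyGet? cs (m : Int) = some cs[m] := by
      simp [PySem.List.pyGet?_natCast, List.getElem?_eq_getElem hml]
    have hd' : ∀ c, (d.insert cs[m] (m : Int)).get? c = firstEqN cs c m := by
      intro c
      by_cases hcc : c = cs[m]
      · subst hcc
        rw [PySem.Dict.get?_insert_self, firstEqN, dif_pos hml, if_pos rfl]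
      · rw [PySem.Dict.get?_insert_of_ne d (m : Int) hcc, hd c]
        conv_rhs => rw [firstEqN]
        rw [dif_pos hml, if_neg (fun h => hcc h.symm)]
    have hnx : d.get? cs[m] = nxtOf cs m := by
      rw [hd cs[m]]
      simp [nxtOf, List.getElem?_eq_getElem hml]
    have hsplit : (List.range (m + 1)).reverse.map (fun (k : Nat) => (k : Int))
        = (m : Int) :: (List.range m).reverse.map (fun (k : Nat) => (k : Int)) := by
      simp [List.range_succ]
    rw [hsplit, List.foldl_cons]
    have happ : (match PySem.List.pyGet? cs (m : Int) with
        | some c => ((d, acc).1.insert c (m : Int), (d, acc).2 ++ [(d, acc).1.get? c])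
        | none => (d, acc))
        = (d.insert cs[m] (m : Int), acc ++ [nxtOf cs m]) := by
      rw [hg]
      simp [hnx]
    rw [happ, B_build cs m (Nat.le_of_lt hml) _ _ hd']
    simp [List.range_succ, List.append_assoc]

lemma enumerate_map_range' (f : Nat → Option Int) :
    ∀ (n k : Nat), PySem.List.enumerate ((List.range' k n).map f) (k : Int)
      = (List.range' k n).map (fun (i : Nat) => ((i : Int), f i))
  | 0, k => by simp
  | (n + 1), k => by
    rw [List.range'_succ]
    simp only [List.map_cons, PySem.List.enumerate]
    have hcast : ((k : Int) + 1) = ((k + 1 : Nat) : Int) := by push_cast; ring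
    rw [hcast, enumerate_map_range' f n (k + 1)]

lemma B_eq_ref (cs : List Char) :
    smallest_gap_alt (String.ofList cs)
    = ((List.range cs.length).foldl
        (fun st (i : Nat) => sgStep cs st (i : Int) (nxtOf cs i)) ((none : Option Int), "")).2 := by
  unfold smallest_gap_alt
  simp only [String.toList_ofList]
  rw [pyRange_down cs.length,
    B_build cs cs.length le_rfl PySem.Dict.empty []
      (fun c => by rw [PySem.Dict.get?_empty, firstEqN_ge cs c cs.length le_rfl]),
    List.nil_append, List.reverse_reverse, List.range_eq_range',
    show (0 : Int) = ((0 : Nat) : Int) from rfl,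
    enumerate_map_range' (nxtOf cs) cs.length 0, List.foldl_map]
  rw [← List.range_eq_range']
  apply congrArg
  apply PySem.List.foldl_congr_mem
  intro st x hx
  cases h : nxtOf cs x with
  | none => simp [sgStep]
  | some j => cases hst : st.1 <;> simp [sgStep, hst]

lemma main_eq (s : String) :
    smallest_gap s = smallest_gap_alt s := by
  have hB := B_eq_ref s.toList
  rw [String.ofList_toList] at hB
  simp only [smallest_gap]
  rw [A_eq_ref s.toList, hB]
  rcases Nat.eq_zero_or_pos s.toList.length with h0 | hpos
  · rw [h0]
  · obtain ⟨m, hm⟩ : ∃ m, s.toList.length = m + 1 := ⟨s.toList.length - 1, by omega⟩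
    have hnone : nxtOf s.toList m = none := by
      unfold nxtOf
      cases h : s.toList[m]? with
      | none => rfl
      | some c => simp [firstEqN_ge s.toList c (m + 1) (by omega)]
    rw [hm]
    simp [List.range_succ, List.foldl_append, hnone, sgStep]

-- ===== VERDICT (by name: the statement is the Claim_ definition above) =====
theorem smallest_gap_spec : Claim_equal_smallest_gap := by
  intro s _
  exact main_eq s
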